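-- pv_equiv track=rewrite | github.com/JacquesPaymentsAgain/Visa-Direct-SDK-TS-Python | python-sdk/visa_direct_sdk/transport/secure_http_client.py | _match_param_route
-- ===== SOURCE A (Python) =====
-- def _match_param_route(template: str, actual: str) -> bool:
-- 	t = template.split("/")
-- 	a = actual.split("/")
-- 	if len(t) != len(a):
-- 		return False
-- 	for i in range(len(t)):
-- 		if t[i].startswith(":"):
-- 			continue
-- 		if t[i] != a[i]:
-- 			return False
-- 	return True
-- ===== SOURCE B (Python) =====
-- def _match_param_route(template: str, actual: str) -> bool:
-- 	# Single character-level lockstep scan of both strings with two cursors: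
-- 	# a ':'-led segment skips both sides to the next '/', a literal segment is
-- 	# compared char by char.  No split, no segment lists.
-- 	t, a, n, m = template, actual, len(template), len(actual)
-- 	i = j = 0
-- 	seg_start = True  # True: at the start of a segment; False: inside a literal segment
-- 	while True:
-- 		if seg_start and i < n and t[i] == ":":
-- 			# parameter segment: skip to the next '/' on both sides
-- 			while i < n and t[i] != "/":
-- 				i += 1
-- 			while j < m and a[j] != "/":
-- 				j += 1
-- 			if i >= n and j >= m:
-- 				return True
-- 			if i < n and j < m:
-- 				i += 1
-- 				j += 1
-- 				continue
-- 			return False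
-- 		# literal position
-- 		if i >= n and j >= m:
-- 			return True
-- 		if i < n and j < m:
-- 			if t[i] == "/" and a[j] == "/":
-- 				i += 1
-- 				j += 1
-- 				seg_start = True
-- 				continue
-- 			if t[i] == "/" or a[j] == "/":
-- 				return False
-- 			if t[i] != a[j]:
-- 				return False
-- 			i += 1
-- 			j += 1
-- 			seg_start = False
-- 			continue
-- 		return False
-- ===== Notes on version B (the rewrite author's own statement) =====
-- stated objective: alternative
-- what changed: Replaces split('/')-into-lists plus an indexed segment loop by a single character-level lockstep scan of the two strings (param segments skip both sides to the next '/', literal segments compare char by char), allocating no segment lists.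
import Mathlib
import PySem

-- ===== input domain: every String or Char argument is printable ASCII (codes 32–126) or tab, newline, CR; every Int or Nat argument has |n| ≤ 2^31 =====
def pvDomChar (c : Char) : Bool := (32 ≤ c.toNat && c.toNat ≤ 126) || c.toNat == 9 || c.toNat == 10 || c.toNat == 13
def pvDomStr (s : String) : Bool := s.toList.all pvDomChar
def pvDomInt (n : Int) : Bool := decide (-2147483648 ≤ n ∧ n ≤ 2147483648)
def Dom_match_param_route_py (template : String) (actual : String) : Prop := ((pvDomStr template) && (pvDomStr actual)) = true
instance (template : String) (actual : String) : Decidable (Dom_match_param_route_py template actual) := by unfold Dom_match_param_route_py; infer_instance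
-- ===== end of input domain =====

-- B replaces split('/') plus an indexed segment loop by one character-level lockstep
-- scan of the two strings (alternative decomposition, same asymptotic cost).

-- ===== PORT A =====
-- the for-loop over range(len(t)) with continue/early return, as recursion over the index list
def pvALoop (t a : List (List Char)) : List Int → Bool
  | [] => true
  | i :: rest =>
      if PySem.Chars.startswith (PySem.List.pyGetD t i []) [':'] then pvALoop t a rest
      else if PySem.List.pyGetD t i [] ≠ PySem.List.pyGetD a i [] then false
      else pvALoop t a rest

def match_param_route_py (template : String) (actual : String) : Bool :=
  let t := PySem.Chars.splitOn template.toList ['/']   -- template.split("/"); "/".toList = ['/']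
  let a := PySem.Chars.splitOn actual.toList ['/']
  if t.length ≠ a.length then false
  else pvALoop t a (PySem.List.pyRange 0 t.length 1)

-- ===== PORT B =====
-- the inner skip loops "while i < n and t[i] != '/': i += 1", acting on the remaining suffix
def pvDropSeg : List Char → List Char
  | [] => []
  | c :: r => if c = '/' then c :: r else pvDropSeg r

theorem pvDropSeg_length_le (s : List Char) : (pvDropSeg s).length ≤ s.length := by
  induction s with
  | nil => simp [pvDropSeg]
  | cons c r ih =>
      unfold pvDropSeg
      split
      · simp
      · simp
        omega

mutual
  -- the outer loop with seg_start = True: at the start of a segment on both sides;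
  -- the cursors i, j are represented by the remaining suffixes t, a
  def pvSegB (t a : List Char) : Bool :=
    match ht : t with
    | ':' :: _ =>
        match h1 : pvDropSeg t, h2 : pvDropSeg a with
        | [], [] => true
        | _ :: t3, _ :: a3 => pvSegB t3 a3
        | _, _ => false
    | _ => pvLitB t a
  termination_by (t.length, 1)
  decreasing_by
    · have := pvDropSeg_length_le t
      rw [h1, ht] at this
      exact Prod.Lex.left _ _ (by simp at this ⊢; omega)
    · rw [← ht]
      exact Prod.Lex.right _ (by omega)
  -- the outer loop with seg_start = False: inside a literal segment, char by char
  def pvLitB (t a : List Char) : Bool :=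
    match t, a with
    | [], [] => true
    | c :: t', d :: a' =>
        if c = '/' ∧ d = '/' then pvSegB t' a'
        else if c = '/' ∨ d = '/' then false
        else decide (c = d) && pvLitB t' a'
    | _, _ => false
  termination_by (t.length, 0)
  decreasing_by
    · exact Prod.Lex.left _ _ (by simp)
    · exact Prod.Lex.left _ _ (by simp)
end

def match_param_route_py_alt (template : String) (actual : String) : Bool :=
  pvSegB template.toList actual.toList

-- ===== PRECONDITION & SPEC =====
def Spec_match_param_route_py (template : String) (actual : String) (out : Bool) : Prop := out = match_param_route_py_alt template actual
instance (template : String) (actual : String) (out : Bool) : Decidable (Spec_match_param_route_py template actual out) := by unfold Spec_match_param_route_py; infer_instance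

-- ===== CLAIM (what is proved, stated in full; the proofs are below) =====
def Claim_equal_match_param_route_py : Prop := ∀ (template : String) (actual : String), Dom_match_param_route_py template actual → Spec_match_param_route_py template actual (match_param_route_py template actual)

-- ===== LEMMAS AND PROOFS =====

-- proof-side: a simple structural recursion computing split on '/'
def pvSplitSlash : List Char → List (List Char)
  | [] => [[]]
  | c :: r =>
      if c = '/' then [] :: pvSplitSlash r
      else
        match pvSplitSlash r with
        | [] => [[c]]      -- unreachable
        | x :: xs => (c :: x) :: xs

-- proof-side: the common segment-wise matching predicate both ports compute
def pvSegsMatch : List (List Char) → List (List Char) → Bool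
  | [], [] => true
  | x :: xs, y :: ys => (PySem.Chars.startswith x [':'] || decide (x = y)) && pvSegsMatch xs ys
  | _, _ => false

theorem pvSplitSlash_ne_nil (l : List Char) : pvSplitSlash l ≠ [] := by
  cases l with
  | nil => simp [pvSplitSlash]
  | cons c r =>
      unfold pvSplitSlash
      split
      · simp
      · cases h : pvSplitSlash r <;> simp

theorem pvGoSlash (fuel : Nat) : ∀ (l cur : List Char) (acc : List (List Char)),
    l.length ≤ fuel →
    PySem.Chars.splitOn.go ['/'] fuel l cur acc =
      acc.reverse ++ (match pvSplitSlash l with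
                      | [] => []
                      | x :: xs => (cur.reverse ++ x) :: xs) := by
  induction fuel with
  | zero =>
      intro l cur acc h
      have hl : l = [] := by cases l <;> simp_all
      subst hl
      rw [PySem.Chars.splitOn.go]
      simp [pvSplitSlash]
  | succ f ih =>
      intro l cur acc h
      cases l with
      | nil =>
          rw [PySem.Chars.splitOn.go]
          simp [pvSplitSlash]
          omega
      | cons c rest =>
          have hstep : PySem.Chars.splitOn.go ['/'] (f+1) (c::rest) cur acc =
              if c = '/' then PySem.Chars.splitOn.go ['/'] f rest [] (cur.reverse :: acc)
              else PySem.Chars.splitOn.go ['/'] f rest (c :: cur) acc := by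
            rw [PySem.Chars.splitOn.go]
            by_cases hc : c = '/'
            · simp [List.isPrefixOf, hc]
            · simp [List.isPrefixOf, hc]
              intro e
              exact absurd e.symm hc
          rw [hstep]
          have hlen : rest.length ≤ f := by simp at h; omega
          by_cases hc : c = '/'
          · rw [if_pos hc, ih rest [] (cur.reverse :: acc) hlen]
            subst hc
            simp [pvSplitSlash]
            cases hr : pvSplitSlash rest with
            | nil => exact absurd hr (pvSplitSlash_ne_nil rest)
            | cons x xs => simp
          · rw [if_neg hc, ih rest (c :: cur) acc hlen]
            simp [pvSplitSlash, hc]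
            cases hr : pvSplitSlash rest with
            | nil => exact absurd hr (pvSplitSlash_ne_nil rest)
            | cons x xs => simp

theorem pvSplitOn_slash (l : List Char) :
    PySem.Chars.splitOn l ['/'] = pvSplitSlash l := by
  rw [PySem.Chars.splitOn, pvGoSlash (l.length + 1) l [] [] (by omega)]
  cases hr : pvSplitSlash l with
  | nil => exact absurd hr (pvSplitSlash_ne_nil l)
  | cons x xs => simp

theorem pvSegsMatch_length {ts as : List (List Char)} (h : ts.length ≠ as.length) :
    pvSegsMatch ts as = false := by
  induction ts generalizing as with
  | nil => cases as <;> simp_all [pvSegsMatch]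
  | cons x xs ih =>
      cases as with
      | nil => simp [pvSegsMatch]
      | cons y ys =>
          simp at h
          simp [pvSegsMatch, ih (by omega)]

theorem pvALoop_eq (d : Nat) : ∀ (k : Nat) (ts as : List (List Char)),
    ts.length = as.length → ts.length - k ≤ d →
    pvALoop ts as (PySem.List.pyRange (k : Int) (ts.length : Int) 1) =
      pvSegsMatch (ts.drop k) (as.drop k) := by
  induction d with
  | zero =>
      intro k ts as hlen hd
      have hk : ts.length ≤ k := by omega
      rw [PySem.List.pyRange_one_eq_nil (by exact_mod_cast hk)]
      rw [List.drop_eq_nil_of_le hk, List.drop_eq_nil_of_le (by omega)]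
      simp [pvALoop, pvSegsMatch]
  | succ d ih =>
      intro k ts as hlen hd
      by_cases hk : ts.length ≤ k
      · rw [PySem.List.pyRange_one_eq_nil (by exact_mod_cast hk)]
        rw [List.drop_eq_nil_of_le hk, List.drop_eq_nil_of_le (by omega)]
        simp [pvALoop, pvSegsMatch]
      · have hklt : k < ts.length := by omega
        rw [PySem.List.pyRange_one_cons (by exact_mod_cast hklt)]
        have hkk : ((k : Int) + 1) = ((k + 1 : Nat) : Int) := by push_cast; ring
        have hget_t : PySem.List.pyGetD ts (k : Int) [] = ts[k] := by
          rw [PySem.List.pyGetD_natCast, List.getD_eq_getElem ts [] hklt]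
        have hget_a : PySem.List.pyGetD as (k : Int) [] = as[k]'(by omega) := by
          rw [PySem.List.pyGetD_natCast, List.getD_eq_getElem as [] (by omega)]
        rw [List.drop_eq_getElem_cons hklt, List.drop_eq_getElem_cons (show k < as.length by omega)]
        have hrec : pvALoop ts as (PySem.List.pyRange ((k : Int) + 1) (ts.length : Int) 1) =
            pvSegsMatch (ts.drop (k+1)) (as.drop (k+1)) := by
          rw [hkk]
          exact ih (k+1) ts as hlen (by omega)
        simp only [pvALoop, pvSegsMatch, hget_t, hget_a, hrec]
        by_cases hs : PySem.Chars.startswith ts[k] [':'] = true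
        · simp [hs]
        · simp only [Bool.not_eq_true] at hs
          by_cases he : ts[k] = as[k]'(by omega)
          · simp_all
          · simp_all

theorem pvA_eq (template actual : String) :
    match_param_route_py template actual =
      pvSegsMatch (pvSplitSlash template.toList) (pvSplitSlash actual.toList) := by
  unfold match_param_route_py
  rw [pvSplitOn_slash, pvSplitOn_slash]
  set ts := pvSplitSlash template.toList with hts
  set as := pvSplitSlash actual.toList with has
  by_cases hlen : ts.length = as.length
  · rw [if_neg (by simp [hlen])]
    have := pvALoop_eq ts.length 0 ts as hlen (by omega)
    simpa using this
  · simp [hlen, pvSegsMatch_length hlen]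

def pvRestSegs : List Char → List (List Char)
  | [] => []
  | _ :: r => pvSplitSlash r

theorem pvSplitSlash_struct (l : List Char) :
    pvSplitSlash l = l.takeWhile (· != '/') :: pvRestSegs (l.dropWhile (· != '/')) := by
  induction l with
  | nil => simp [pvSplitSlash, pvRestSegs]
  | cons c r ih =>
      by_cases hc : c = '/'
      · simp [pvSplitSlash, hc, pvRestSegs]
      · rw [List.takeWhile_cons, List.dropWhile_cons]
        simp only [bne_iff_ne, ne_eq, hc, not_false_eq_true, if_pos]
        unfold pvSplitSlash
        rw [if_neg hc, ih]

theorem pvDropSeg_eq (s : List Char) : pvDropSeg s = s.dropWhile (· != '/') := by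
  induction s with
  | nil => simp [pvDropSeg]
  | cons c r ih =>
      by_cases hc : c = '/' <;> simp [pvDropSeg, hc, ih]

theorem pv_startswith_cons (c : Char) (w : List Char) :
    PySem.Chars.startswith (c :: w) [':'] = (c == ':') := by
  simp [PySem.Chars.startswith, List.isPrefixOf]
  exact eq_comm

theorem pv_startswith_nil : PySem.Chars.startswith [] [':'] = false := by decide

theorem pv_startswith_take (t : List Char) (hc : ∀ r, t ≠ ':' :: r) :
    PySem.Chars.startswith (t.takeWhile (· != '/')) [':'] = false := by
  cases t with
  | nil => simpa using pv_startswith_nil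
  | cons c t' =>
      by_cases h : c = '/'
      · simp [h]
        exact pv_startswith_nil
      · rw [List.takeWhile_cons]
        simp only [bne_iff_ne, ne_eq, h, not_false_eq_true, if_pos]
        rw [pv_startswith_cons]
        have : c ≠ ':' := by
          intro hcc
          exact hc t' (by rw [hcc])
        simp [this]

theorem pv_segsMatch_decomp (t a : List Char) :
    pvSegsMatch (pvSplitSlash t) (pvSplitSlash a) =
      ((PySem.Chars.startswith (t.takeWhile (· != '/')) [':'] ||
          decide (t.takeWhile (· != '/') = a.takeWhile (· != '/'))) &&
        pvSegsMatch (pvRestSegs (t.dropWhile (· != '/'))) (pvRestSegs (a.dropWhile (· != '/')))) := by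
  rw [pvSplitSlash_struct t, pvSplitSlash_struct a]
  simp [pvSegsMatch]

theorem pv_segsMatch_nil_ne (l : List Char) :
    pvSegsMatch [] (pvSplitSlash l) = false ∧ pvSegsMatch (pvSplitSlash l) [] = false := by
  cases h : pvSplitSlash l with
  | nil => exact absurd h (pvSplitSlash_ne_nil l)
  | cons x xs' => exact ⟨rfl, rfl⟩


theorem pvSegB_nil (a : List Char) : pvSegB [] a = pvLitB [] a := by
  rw [pvSegB]
  simp

theorem pvSegB_colon_nil_nil (t' a : List Char) (h1 : pvDropSeg (':' :: t') = []) (h2 : pvDropSeg a = []) :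
    pvSegB (':' :: t') a = true := by
  rw [pvSegB]
  split <;> simp_all

theorem pvSegB_colon_cons_cons (t' a : List Char) (x y : Char) (u v : List Char)
    (h1 : pvDropSeg (':' :: t') = x :: u) (h2 : pvDropSeg a = y :: v) :
    pvSegB (':' :: t') a = pvSegB u v := by
  rw [pvSegB]
  split <;> simp_all
  rename_i hno
  exact absurd rfl (hno x u y v rfl rfl rfl)

theorem pvSegB_colon_cons_nil (t' a : List Char) (x : Char) (u : List Char)
    (h1 : pvDropSeg (':' :: t') = x :: u) (h2 : pvDropSeg a = []) :
    pvSegB (':' :: t') a = false := by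
  rw [pvSegB]
  split <;> simp_all

theorem pvSegB_colon_nil_cons (t' a : List Char) (y : Char) (v : List Char)
    (h1 : pvDropSeg (':' :: t') = []) (h2 : pvDropSeg a = y :: v) :
    pvSegB (':' :: t') a = false := by
  rw [pvSegB]
  split <;> simp_all

theorem pvSegB_not_colon (c : Char) (t' a : List Char) (h : c ≠ ':') : pvSegB (c :: t') a = pvLitB (c :: t') a := by
  rw [pvSegB]
  simp [h]

theorem pvLitB_cons_cons (c d : Char) (t' a' : List Char) : pvLitB (c :: t') (d :: a') =
    (if c = '/' ∧ d = '/' then pvSegB t' a'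
     else if c = '/' ∨ d = '/' then false
     else decide (c = d) && pvLitB t' a') := by
  rw [pvLitB]

theorem pvLitB_nil_nil : pvLitB ([] : List Char) [] = true := by rw [pvLitB]
theorem pvLitB_nil_cons (d : Char) (a' : List Char) : pvLitB [] (d :: a') = false := by rw [pvLitB] <;> simp
theorem pvLitB_cons_nil (c : Char) (t' : List Char) : pvLitB (c :: t') [] = false := by rw [pvLitB] <;> simp


theorem pvLitB_nil_eq (a : List Char) :
    pvLitB [] a = (((List.nil.takeWhile (· != '/') : List Char) = a.takeWhile (· != '/')) &&
      (match (List.nil.dropWhile (· != '/') : List Char), a.dropWhile (· != '/') with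
       | [], [] => true
       | _ :: u, _ :: v => pvSegB u v
       | _, _ => false)) := by
  cases a with
  | nil => rw [pvLitB_nil_nil]; simp
  | cons e a' =>
      rw [pvLitB_nil_cons]
      by_cases he : e = '/' <;> simp [he]

theorem pvSegB_nil_eq (a : List Char) :
    pvSegB [] a = pvSegsMatch (pvSplitSlash []) (pvSplitSlash a) := by
  rw [pvSegB_nil, pv_segsMatch_decomp]
  cases a with
  | nil => rw [pvLitB_nil_nil]; simp [pvRestSegs, pvSegsMatch, pv_startswith_nil]
  | cons e a' =>
      rw [pvLitB_nil_cons]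
      by_cases he : e = '/'
      · simp [he, pvRestSegs, pv_startswith_nil]
        exact (pv_segsMatch_nil_ne a').1
      · simp [he, pv_startswith_nil]

theorem pvB_eq_aux (d : Nat) :
    (∀ t a : List Char, t.length ≤ d →
        pvLitB t a = ((t.takeWhile (· != '/') = a.takeWhile (· != '/')) &&
          (match t.dropWhile (· != '/'), a.dropWhile (· != '/') with
           | [], [] => true
           | _ :: u, _ :: v => pvSegB u v
           | _, _ => false))) ∧
    (∀ t a : List Char, t.length ≤ d →
        pvSegB t a = pvSegsMatch (pvSplitSlash t) (pvSplitSlash a)) := by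
  induction d with
  | zero =>
      constructor
      · intro t a ht
        have h0 : t = [] := by cases t <;> simp_all
        subst h0
        exact pvLitB_nil_eq a
      · intro t a ht
        have h0 : t = [] := by cases t <;> simp_all
        subst h0
        exact pvSegB_nil_eq a
  | succ d ih =>
      obtain ⟨ihl, ihs⟩ := ih
      have hlit : ∀ t a : List Char, t.length ≤ d + 1 →
          pvLitB t a = ((t.takeWhile (· != '/') = a.takeWhile (· != '/')) &&
            (match t.dropWhile (· != '/'), a.dropWhile (· != '/') with
             | [], [] => true
             | _ :: u, _ :: v => pvSegB u v
             | _, _ => false)) := by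
        intro t a ht
        cases t with
        | nil => exact pvLitB_nil_eq a
        | cons c t' =>
            cases a with
            | nil =>
                rw [pvLitB_cons_nil]
                by_cases hc : c = '/' <;> simp [hc]
            | cons e a' =>
                rw [pvLitB_cons_cons]
                by_cases hc : c = '/' <;> by_cases he : e = '/'
                · rw [if_pos ⟨hc, he⟩]
                  simp [hc, he]
                · rw [if_neg (by tauto), if_pos (Or.inl hc)]
                  simp [hc, he]
                · rw [if_neg (by tauto), if_pos (Or.inr he)]
                  simp [hc, he]
                · rw [if_neg (by tauto), if_neg (by tauto)]
                  rw [ihl t' a' (by simp at ht; omega)]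
                  by_cases hce : c = e <;> simp [hc, he, hce]
      have hseg : ∀ t a : List Char, t.length ≤ d + 1 →
          pvSegB t a = pvSegsMatch (pvSplitSlash t) (pvSplitSlash a) := by
        intro t a ht
        cases t with
        | nil => exact pvSegB_nil_eq a
        | cons c t' =>
            by_cases hc : c = ':'
            · subst hc
              rw [pv_segsMatch_decomp]
              have hsw : PySem.Chars.startswith ((':' :: t').takeWhile (· != '/')) [':'] = true := by
                rw [List.takeWhile_cons]
                simp only [show ((':' : Char) != '/') = true from rfl, if_pos]
                rw [pv_startswith_cons]
                simp
              rw [hsw, Bool.true_or, Bool.true_and]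
              have hdd : pvDropSeg (':' :: t') = pvDropSeg t' := by simp [pvDropSeg]
              have hlen' : (pvDropSeg t').length ≤ t'.length := pvDropSeg_length_le t'
              cases hdt : pvDropSeg (':' :: t') with
              | nil =>
                  cases hda : pvDropSeg a with
                  | nil =>
                      rw [pvSegB_colon_nil_nil t' a hdt hda]
                      rw [← pvDropSeg_eq, ← pvDropSeg_eq, hdt, hda]
                      simp [pvRestSegs, pvSegsMatch]
                  | cons y v =>
                      rw [pvSegB_colon_nil_cons t' a y v hdt hda]
                      rw [← pvDropSeg_eq, ← pvDropSeg_eq, hdt, hda]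
                      exact ((pv_segsMatch_nil_ne v).1).symm
              | cons x u =>
                  cases hda : pvDropSeg a with
                  | nil =>
                      rw [pvSegB_colon_cons_nil t' a x u hdt hda]
                      rw [← pvDropSeg_eq, ← pvDropSeg_eq, hdt, hda]
                      exact ((pv_segsMatch_nil_ne u).2).symm
                  | cons y v =>
                      rw [pvSegB_colon_cons_cons t' a x y u v hdt hda]
                      rw [← pvDropSeg_eq, ← pvDropSeg_eq, hdt, hda]
                      have hu : u.length ≤ d := by
                        have h1 : pvDropSeg t' = x :: u := by
                          rw [← hdt]; simp [pvDropSeg]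
                        rw [h1] at hlen'
                        simp at hlen' ht
                        omega
                      rw [ihs u v hu]
                      simp [pvRestSegs]
            · rw [pvSegB_not_colon c t' a hc, hlit (c :: t') a ht,
                  pv_segsMatch_decomp,
                  pv_startswith_take (c :: t') (by intro r h; injection h with h1 _; exact hc h1),
                  Bool.false_or]
              have hrest : (match (c :: t').dropWhile (· != '/'), a.dropWhile (· != '/') with
                   | ([] : List Char), ([] : List Char) => true
                   | _ :: u, _ :: v => pvSegB u v
                   | _, _ => false) =
                  pvSegsMatch (pvRestSegs ((c :: t').dropWhile (· != '/')))
                    (pvRestSegs (a.dropWhile (· != '/'))) := by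
                have hlen' : ((c :: t').dropWhile (· != '/')).length ≤ (c :: t').length :=
                  List.length_dropWhile_le _ _
                cases hdt : (c :: t').dropWhile (· != '/') with
                | nil =>
                    cases hda : a.dropWhile (· != '/') with
                    | nil => simp [pvRestSegs, pvSegsMatch]
                    | cons y v => exact ((pv_segsMatch_nil_ne v).1).symm
                | cons x u =>
                    cases hda : a.dropWhile (· != '/') with
                    | nil => exact ((pv_segsMatch_nil_ne u).2).symm
                    | cons y v =>
                        have hu : u.length ≤ d := by
                          rw [hdt] at hlen'
                          simp at hlen' ht
                          omega
                        show pvSegB u v = pvSegsMatch (pvRestSegs (x :: u)) (pvRestSegs (y :: v))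
                        rw [ihs u v hu]
                        simp [pvRestSegs]
              rw [hrest]
      exact ⟨hlit, hseg⟩

theorem pvB_eq (template actual : String) :
    match_param_route_py_alt template actual =
      pvSegsMatch (pvSplitSlash template.toList) (pvSplitSlash actual.toList) := by
  exact (pvB_eq_aux template.toList.length).2 template.toList actual.toList le_rfl


-- ===== VERDICT (by name: the statement is the Claim_ definition above) =====
theorem match_param_route_py_spec : Claim_equal_match_param_route_py := by
  intro template actual _
  unfold Spec_match_param_route_py
  rw [pvA_eq, pvB_eq]
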